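-- pv_equiv track=rewrite | github.com/deontmba/23002-Gideon-Tamba | Tugas 3/elgamal.py | elgamal_encrypt
-- ===== SOURCE A (Python) =====
-- def power(base, exp, mod):
--     res = 1
--     base %= mod
--     while exp > 0:
--         if exp % 2 == 1:
--             res = (res * base) % mod
--         base = (base * base) % mod
--         exp //= 2
--     return res
--
-- def elgamal_encrypt(plaintext, p, g, y, k):
--     c1 = power(g, k, p)
--
--     yk_mod_p = power(y, k, p)
--
--     ciphertext_pairs = []
--     for char in plaintext:
--         m = ord(char.upper()) - ord('A')
--
--         c2 = (m * yk_mod_p) % p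
--         ciphertext_pairs.append(c2)
--
--     return (c1, ciphertext_pairs)
-- ===== SOURCE B (Python) =====
-- def _bits(e):
--     # most-significant-first binary digits of e (empty list for e <= 0)
--     if e <= 0:
--         return []
--     return _bits(e // 2) + [e % 2]
--
-- def _mpow(base, exp, mod):
--     # left-to-right (MSB-first) square-and-multiply over the digit list
--     base %= mod
--     r = 1
--     for b in _bits(exp):
--         r = (r * r) % mod
--         if b == 1:
--             r = (r * base) % mod
--     return r
--
-- def elgamal_encrypt(plaintext, p, g, y, k):
--     s = _mpow(y, k, p)
--     return (_mpow(g, k, p), [(ord(ch.upper()) - ord('A')) * s % p for ch in plaintext])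
-- ===== Notes on version B (the rewrite author's own statement) =====
-- stated objective: alternative
-- what changed: A's iterative LSB-first square-and-multiply loop with mutable (res, base, exp) state is replaced by first materialising the exponent's MSB-first binary digit list recursively and then folding left-to-right square-and-multiply over it, and the ciphertext list is built by a comprehension instead of append in a loop.
import Mathlib
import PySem

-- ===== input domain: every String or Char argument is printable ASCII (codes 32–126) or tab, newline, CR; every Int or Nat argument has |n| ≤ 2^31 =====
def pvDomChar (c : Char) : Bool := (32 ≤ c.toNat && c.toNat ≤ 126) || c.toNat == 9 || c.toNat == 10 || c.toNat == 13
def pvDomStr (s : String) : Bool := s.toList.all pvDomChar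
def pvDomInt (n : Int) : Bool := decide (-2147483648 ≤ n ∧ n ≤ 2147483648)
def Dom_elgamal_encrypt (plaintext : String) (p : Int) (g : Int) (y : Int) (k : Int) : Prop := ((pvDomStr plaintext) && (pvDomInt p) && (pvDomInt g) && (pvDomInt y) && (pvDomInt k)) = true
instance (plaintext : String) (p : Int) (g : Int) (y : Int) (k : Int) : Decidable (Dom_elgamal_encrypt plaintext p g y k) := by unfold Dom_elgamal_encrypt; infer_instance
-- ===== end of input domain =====

-- B replaces A's iterative LSB-first square-and-multiply by an MSB-first digit-list fold
-- (bits built first, then left-to-right square-and-multiply); same cost, alternative decomposition.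


-- ===== PORT A =====
-- the 'while exp > 0' loop of A's power, state (res, base, exp)
def pyPowLoop (m : Int) (res base exp : Int) : Int :=
  if _h : 0 < exp then
    pyPowLoop m
      (if PySem.Int.mod exp 2 = 1 then PySem.Int.mod (res * base) m else res)
      (PySem.Int.mod (base * base) m)
      (PySem.Int.floordiv exp 2)
  else res
termination_by exp.toNat
decreasing_by
  rw [PySem.Int.floordiv_eq_ediv_of_pos (by omega : (0:Int) < 2)]; omega

def pyPower (base exp m : Int) : Int := pyPowLoop m 1 (PySem.Int.mod base m) exp

def elgamal_encrypt (plaintext : String) (p : Int) (g : Int) (y : Int) (k : Int) : Int × List Int :=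
  let c1 := pyPower g k p
  let yk_mod_p := pyPower y k p
  let ciphertext_pairs := plaintext.toList.foldl
    (fun acc ch => acc ++ [PySem.Int.mod ((((PySem.Chars.upperChar ch).toNat : Int) - 65) * yk_mod_p) p]) []
  (c1, ciphertext_pairs)

-- ===== PORT B =====
-- B's _bits: MSB-first binary digits of e (empty for e <= 0)
def pvBits (e : Int) : List Int :=
  if _h : e ≤ 0 then []
  else pvBits (PySem.Int.floordiv e 2) ++ [PySem.Int.mod e 2]
termination_by e.toNat
decreasing_by
  rw [PySem.Int.floordiv_eq_ediv_of_pos (by omega : (0:Int) < 2)]; omega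

-- one step of B's left-to-right square-and-multiply fold
def pvStep (m base r b : Int) : Int :=
  let r2 := PySem.Int.mod (r * r) m
  if b = 1 then PySem.Int.mod (r2 * base) m else r2

def pvMpow (base exp m : Int) : Int :=
  let b := PySem.Int.mod base m
  (pvBits exp).foldl (pvStep m b) 1

def elgamal_encrypt_alt (plaintext : String) (p : Int) (g : Int) (y : Int) (k : Int) : Int × List Int :=
  let s := pvMpow y k p
  (pvMpow g k p,
   plaintext.toList.map
     (fun ch => PySem.Int.mod ((((PySem.Chars.upperChar ch).toNat : Int) - 65) * s) p))

-- ===== PRECONDITION & SPEC =====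
-- Pre_ excludes exactly p = 0, where A's 'base %= mod' raises ZeroDivisionError (B raises there too).
def Pre_elgamal_encrypt (plaintext : String) (p : Int) (g : Int) (y : Int) (k : Int) : Prop := p ≠ 0
instance (plaintext : String) (p : Int) (g : Int) (y : Int) (k : Int) : Decidable (Pre_elgamal_encrypt plaintext p g y k) := by unfold Pre_elgamal_encrypt; infer_instance

def pvWitness_elgamal_encrypt : String × Int × Int × Int × Int := ("HELLO", 97, 5, 23, 7)

def Spec_elgamal_encrypt (plaintext : String) (p : Int) (g : Int) (y : Int) (k : Int) (out : Int × List Int) : Prop := out = elgamal_encrypt_alt plaintext p g y k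
instance (plaintext : String) (p : Int) (g : Int) (y : Int) (k : Int) (out : Int × List Int) : Decidable (Spec_elgamal_encrypt plaintext p g y k out) := by unfold Spec_elgamal_encrypt; infer_instance

-- ===== CLAIM (what is proved, stated in full; the proofs are below) =====
def Claim_equal_elgamal_encrypt : Prop := ∀ (plaintext : String) (p : Int) (g : Int) (y : Int) (k : Int), Dom_elgamal_encrypt plaintext p g y k → Pre_elgamal_encrypt plaintext p g y k → Spec_elgamal_encrypt plaintext p g y k (elgamal_encrypt plaintext p g y k)

-- ===== LEMMAS AND PROOFS =====

-- Python's % m depends only on the residue class modulo m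
lemma pv_mod_congr {m : Int} (hm : m ≠ 0) {a b : Int} (h : m ∣ a - b) :
    PySem.Int.mod a m = PySem.Int.mod b m := by
  have ha := PySem.Int.floordiv_mul_add_mod a m
  have hb := PySem.Int.floordiv_mul_add_mod b m
  obtain ⟨c, hc⟩ := h
  have hd : m ∣ (PySem.Int.mod a m - PySem.Int.mod b m) :=
    ⟨c - PySem.Int.floordiv a m + PySem.Int.floordiv b m, by linear_combination hc + ha - hb⟩
  rcases lt_or_gt_of_ne hm with hneg | hpos
  · have h1 := PySem.Int.mod_neg_bounds a hneg
    have h2 := PySem.Int.mod_neg_bounds b hneg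
    have h0 : PySem.Int.mod a m - PySem.Int.mod b m = 0 :=
      Int.eq_zero_of_abs_lt_dvd ((neg_dvd).mpr hd) (by rw [abs_lt]; omega)
    omega
  · have h1a := PySem.Int.mod_nonneg a hpos
    have h1b := PySem.Int.mod_lt a hpos
    have h2a := PySem.Int.mod_nonneg b hpos
    have h2b := PySem.Int.mod_lt b hpos
    have h0 : PySem.Int.mod a m - PySem.Int.mod b m = 0 :=
      Int.eq_zero_of_abs_lt_dvd hd (by rw [abs_lt]; omega)
    omega

lemma pv_mod_sub_self (m a : Int) : m ∣ (PySem.Int.mod a m - a) := by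
  have h := PySem.Int.floordiv_mul_add_mod a m
  exact ⟨-(PySem.Int.floordiv a m), by linear_combination h⟩

lemma pv_dvd_sub_mul {m a a' b b' : Int} (h1 : m ∣ a - a') (h2 : m ∣ b - b') :
    m ∣ a * b - a' * b' := by
  have : a * b - a' * b' = (a - a') * b + a' * (b - b') := by ring
  rw [this]
  exact dvd_add (h1.mul_right b) (h2.mul_left a')

lemma pv_dvd_sub_pow {m x y : Int} (h : m ∣ x - y) (n : Nat) : m ∣ x ^ n - y ^ n :=
  dvd_trans h (sub_dvd_pow_sub_pow x y n)

-- invariant of A's loop: for exp > 0 it returns (res * base^exp) % m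
lemma pyPowLoop_eq {m : Int} (hm : m ≠ 0) :
    ∀ (n : Nat) (exp res base : Int), 0 < exp → exp.toNat = n →
      pyPowLoop m res base exp = PySem.Int.mod (res * base ^ exp.toNat) m := by
  intro n
  induction n using Nat.strong_induction_on with
  | _ n ih =>
    intro exp res base hexp hn
    have h2 : (0:Int) < 2 := by omega
    have hfd : PySem.Int.floordiv exp 2 = exp / 2 := PySem.Int.floordiv_eq_ediv_of_pos h2
    have hmod2 : PySem.Int.mod exp 2 = exp % 2 := PySem.Int.mod_eq_emod_of_pos h2
    rw [pyPowLoop, dif_pos hexp]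
    by_cases hpos : 0 < exp / 2
    · -- recursive case
      have hlt : (PySem.Int.floordiv exp 2).toNat < n := by rw [hfd]; omega
      rw [ih _ hlt _ _ _ (by rw [hfd]; exact hpos) rfl]
      have he' : (PySem.Int.floordiv exp 2).toNat = exp.toNat / 2 := by rw [hfd]; omega
      rw [he']
      set e' := exp.toNat / 2 with he'def
      have hbase : m ∣ (PySem.Int.mod (base * base) m) ^ e' - (base * base) ^ e' :=
        pv_dvd_sub_pow (pv_mod_sub_self m (base * base)) e'
      by_cases hodd : PySem.Int.mod exp 2 = 1
      · have he : exp.toNat = 2 * e' + 1 := by rw [hmod2] at hodd; omega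
        rw [if_pos hodd, he]
        refine pv_mod_congr hm ?_
        have := pv_dvd_sub_mul (pv_mod_sub_self m (res * base)) hbase
        have hring : res * base ^ (2 * e' + 1) = res * base * (base * base) ^ e' := by
          rw [show base * base = base ^ 2 by ring, ← pow_mul, pow_succ, ← mul_assoc]
          ring_nf
        rw [hring]
        exact this
      · have he : exp.toNat = 2 * e' := by rw [hmod2] at hodd; omega
        rw [if_neg hodd, he]
        refine pv_mod_congr hm ?_
        have hres : m ∣ res - res := by simp
        have hmul := pv_dvd_sub_mul hres hbase
        have hring : res * base ^ (2 * e') = res * (base * base) ^ e' := by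
          rw [show base * base = base ^ 2 by ring, ← pow_mul]
        rw [hring]
        exact hmul
    · -- exp = 1: next call returns immediately
      have hexp1 : exp = 1 := by omega
      subst hexp1
      have hodd : PySem.Int.mod (1:Int) 2 = 1 := by rw [hmod2]; decide
      rw [if_pos hodd, hfd, show (1:Int)/2 = 0 from rfl, pyPowLoop, dif_neg (by omega : ¬ (0:Int) < 0)]
      norm_num

-- B's digit fold: for e > 0 it returns (b^e) % m
lemma pvBits_foldl_eq {m : Int} (hm : m ≠ 0) (b : Int) :
    ∀ (n : Nat) (e : Int), 0 < e → e.toNat = n →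
      (pvBits e).foldl (pvStep m b) 1 = PySem.Int.mod (b ^ e.toNat) m := by
  intro n
  induction n using Nat.strong_induction_on with
  | _ n ih =>
    intro e he hn
    have h2 : (0:Int) < 2 := by omega
    have hfd : PySem.Int.floordiv e 2 = e / 2 := PySem.Int.floordiv_eq_ediv_of_pos h2
    have hmod2 : PySem.Int.mod e 2 = e % 2 := PySem.Int.mod_eq_emod_of_pos h2
    rw [pvBits, dif_neg (by omega : ¬ e ≤ 0), List.foldl_append]
    by_cases hpos : 0 < e / 2
    · have hlt : (PySem.Int.floordiv e 2).toNat < n := by rw [hfd]; omega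
      rw [ih _ hlt _ (by rw [hfd]; exact hpos) rfl]
      have he' : (PySem.Int.floordiv e 2).toNat = e.toNat / 2 := by rw [hfd]; omega
      rw [he']
      set e' := e.toNat / 2 with he'def
      have hsq : m ∣ PySem.Int.mod (b ^ e') m * PySem.Int.mod (b ^ e') m - b ^ (2 * e') := by
        have := pv_dvd_sub_mul (pv_mod_sub_self m (b ^ e')) (pv_mod_sub_self m (b ^ e'))
        rwa [two_mul, pow_add]
      simp only [List.foldl_cons, List.foldl_nil, pvStep]
      by_cases hodd : PySem.Int.mod e 2 = 1
      · have he2 : e.toNat = 2 * e' + 1 := by rw [hmod2] at hodd; omega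
        rw [if_pos hodd, he2]
        refine pv_mod_congr hm ?_
        have h1 : m ∣ PySem.Int.mod (PySem.Int.mod (b ^ e') m * PySem.Int.mod (b ^ e') m) m
            - b ^ (2 * e') := by
          have h0 := pv_mod_sub_self m (PySem.Int.mod (b ^ e') m * PySem.Int.mod (b ^ e') m)
          have := dvd_add h0 hsq
          simpa using this
        have hstep := pv_dvd_sub_mul h1 (show m ∣ b - b by simp)
        rw [pow_succ]
        exact hstep
      · have he2 : e.toNat = 2 * e' := by rw [hmod2] at hodd; omega
        rw [if_neg hodd, he2]
        exact pv_mod_congr hm hsq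
    · -- e = 1: bit list is [1]
      have he1 : e = 1 := by omega
      subst he1
      have hodd : PySem.Int.mod (1:Int) 2 = 1 := by rw [hmod2]; decide
      rw [hfd, show (1:Int)/2 = 0 from rfl,
          show pvBits 0 = [] from by rw [pvBits, dif_pos (by omega : (0:Int) ≤ 0)]]
      simp only [List.foldl_nil, List.foldl_cons, pvStep, if_pos hodd]
      have : (1:Int).toNat = 1 := rfl
      rw [this, pow_one]
      refine pv_mod_congr hm ?_
      have := pv_dvd_sub_mul (pv_mod_sub_self m ((1:Int) * 1)) (show m ∣ b - b by simp)
      simpa using this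

-- the two power helpers agree (for m ≠ 0)
lemma pv_power_eq (base exp m : Int) (hm : m ≠ 0) : pyPower base exp m = pvMpow base exp m := by
  by_cases hexp : 0 < exp
  · rw [pyPower, pvMpow,
        pyPowLoop_eq hm exp.toNat exp 1 (PySem.Int.mod base m) hexp rfl,
        pvBits_foldl_eq hm (PySem.Int.mod base m) exp.toNat exp hexp rfl, one_mul]
  · rw [pyPower, pvMpow, pyPowLoop, dif_neg hexp, pvBits, dif_pos (by omega : exp ≤ 0)]
    rfl

-- ===== VERDICT (by name: the statement is the Claim_ definition above) =====
theorem elgamal_encrypt_spec : Claim_equal_elgamal_encrypt := by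
  intro plaintext p g y k _hdom hp
  have hp' : p ≠ 0 := hp
  unfold Spec_elgamal_encrypt
  simp only [elgamal_encrypt, elgamal_encrypt_alt, pv_power_eq g k p hp', pv_power_eq y k p hp',
    PySem.List.foldl_append_singleton_eq_map, List.nil_append]
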